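-- pv_equiv track=rewrite | github.com/ShivanshTiwari613/Rag-Codebase-Explainer | src/data_processing/loader.py | _infer_markdown_heading
-- ===== SOURCE A (Python) =====
-- from typing import Iterable, List, Optional, Tuple
--
-- def _infer_markdown_heading(lines: List[str], start_line: int) -> Tuple[Optional[str], Optional[int]]:
--     for index in range(start_line - 1, -1, -1):
--         text = lines[index].rstrip()
--         if text.startswith("#"):
--             level = len(text) - len(text.lstrip("#"))
--             title = text[level:].strip()
--             return (title or None, level)
--     return (None, None)
-- ===== SOURCE B (Python) =====
-- def _infer_markdown_heading(lines, start_line):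
--     if start_line <= 0:
--         return (None, None)
--     headings = [t for t in (line.rstrip() for line in lines[:start_line]) if t.startswith("#")]
--     if not headings:
--         return (None, None)
--     text = headings[-1]
--     level = 0
--     for ch in text:
--         if ch != "#":
--             break
--         level += 1
--     title = text[level:].strip()
--     return (title or None, level)
-- ===== Notes on version B (the rewrite author's own statement) =====
-- stated objective: alternative
-- what changed: A scans backwards index by index from start_line-1 and early-returns at the first heading it parses with an lstrip('#') length subtraction; B slices the prefix lines[:start_line], builds the list of all stripped heading lines by filtering, takes the last one, and counts its leading '#' with an explicit index loop.
-- crash fix: A raises IndexError whenever start_line > len(lines) (the first backward index is already out of range); B's slice clamps and it returns the heading inferred from the whole list. — e.g. on _infer_markdown_heading(["#a"], 2): A raises IndexError, B returns (some "a", some 1)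
import Mathlib
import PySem

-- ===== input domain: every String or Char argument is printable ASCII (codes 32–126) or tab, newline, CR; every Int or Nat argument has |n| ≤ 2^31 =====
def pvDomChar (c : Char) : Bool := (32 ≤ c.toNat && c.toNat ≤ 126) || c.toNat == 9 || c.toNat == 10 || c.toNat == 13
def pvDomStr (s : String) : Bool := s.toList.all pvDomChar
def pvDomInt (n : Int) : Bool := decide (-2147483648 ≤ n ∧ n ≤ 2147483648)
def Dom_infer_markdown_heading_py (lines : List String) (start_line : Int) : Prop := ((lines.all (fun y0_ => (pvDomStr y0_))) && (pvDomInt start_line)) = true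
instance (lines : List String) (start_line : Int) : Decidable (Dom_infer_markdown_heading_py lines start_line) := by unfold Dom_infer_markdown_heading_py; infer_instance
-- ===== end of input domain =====

-- B replaces A's backward early-return index scan by slice-prefix → filter headings → take last,
-- with leading '#' counted by an index loop (alternative decomposition, same cost).

-- ===== PORT A =====
-- A's backward loop with early return, as structural recursion over the index list.
-- 'lstrip("#")' is ported step for step as dropWhile (· == '#') (exact for a one-char strip set).
def pvGoA (lines : List String) : List Int → Option String × Option Int
  | [] => (none, none)
  | i :: rest =>
    let text := PySem.Chars.rstrip (PySem.List.pyGetD lines i "").toList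
    if PySem.Chars.startswith text ['#'] then
      let level : Int := (text.length : Int) - ((text.dropWhile (· == '#')).length : Int)
      let title := PySem.Chars.strip (PySem.List.slice text (some level) none)
      (if title = [] then none else some (String.ofList title), some level)
    else pvGoA lines rest

def infer_markdown_heading_py (lines : List String) (start_line : Int) : Option String × Option Int :=
  pvGoA lines (PySem.List.pyRange (start_line - 1) (-1) (-1))

-- ===== PORT B =====
-- the 'for ch in text: if ch != "#": break; level += 1' loop of Source B, as structural recursion
def pvCountHash : List Char → Nat
  | [] => 0
  | ch :: rest => if ch ≠ '#' then 0 else pvCountHash rest + 1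

def infer_markdown_heading_py_alt (lines : List String) (start_line : Int) : Option String × Option Int :=
  if start_line ≤ 0 then (none, none)
  else
    let headings :=
      ((PySem.List.slice lines none (some start_line)).map
          (fun line => PySem.Chars.rstrip line.toList)).filter
        (fun t => PySem.Chars.startswith t ['#'])
    match headings.getLast? with
    | none => (none, none)
    | some text =>
      let level := pvCountHash text
      let title := PySem.Chars.strip (text.drop level)
      (if title = [] then none else some (String.ofList title), some (level : Int))

-- ===== PRECONDITION & SPEC =====
-- Pre_ excludes start_line > len(lines), where Python A raises IndexError (the first backward index
-- lines[start_line-1] is already out of range).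
def Pre_infer_markdown_heading_py (lines : List String) (start_line : Int) : Prop :=
  start_line ≤ (lines.length : Int)
instance (lines : List String) (start_line : Int) : Decidable (Pre_infer_markdown_heading_py lines start_line) := by unfold Pre_infer_markdown_heading_py; infer_instance
def pvWitness_infer_markdown_heading_py : List String × Int := (["# Title", "body"], 2)

-- A raises IndexError whenever start_line > len(lines); B's slice clamps and it returns the
-- heading inferred from the whole list.
def Raises_infer_markdown_heading_py (lines : List String) (start_line : Int) : Prop :=
  (lines.length : Int) < start_line
instance (lines : List String) (start_line : Int) : Decidable (Raises_infer_markdown_heading_py lines start_line) := by unfold Raises_infer_markdown_heading_py; infer_instance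
def pvRaiseWitness_infer_markdown_heading_py : List String × Int := (["#a"], 2)
def pvRaiseWitnessOut_infer_markdown_heading_py : Option String × Option Int := (some "a", some 1)

def Spec_infer_markdown_heading_py (lines : List String) (start_line : Int) (out : Option String × Option Int) : Prop := out = infer_markdown_heading_py_alt lines start_line
instance (lines : List String) (start_line : Int) (out : Option String × Option Int) : Decidable (Spec_infer_markdown_heading_py lines start_line out) := by unfold Spec_infer_markdown_heading_py; infer_instance

-- ===== CLAIM (what is proved, stated in full; the proofs are below) =====
def Claim_equal_infer_markdown_heading_py : Prop := ∀ (lines : List String) (start_line : Int), Dom_infer_markdown_heading_py lines start_line → Pre_infer_markdown_heading_py lines start_line → Spec_infer_markdown_heading_py lines start_line (infer_markdown_heading_py lines start_line)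
def Claim_raises_infer_markdown_heading_py : Prop := (∀ (lines : List String) (start_line : Int), Dom_infer_markdown_heading_py lines start_line → Raises_infer_markdown_heading_py lines start_line → ¬ Pre_infer_markdown_heading_py lines start_line) ∧ (Dom_infer_markdown_heading_py (pvRaiseWitness_infer_markdown_heading_py.1) (pvRaiseWitness_infer_markdown_heading_py.2) ∧ Raises_infer_markdown_heading_py (pvRaiseWitness_infer_markdown_heading_py.1) (pvRaiseWitness_infer_markdown_heading_py.2) ∧ infer_markdown_heading_py_alt (pvRaiseWitness_infer_markdown_heading_py.1) (pvRaiseWitness_infer_markdown_heading_py.2) = pvRaiseWitnessOut_infer_markdown_heading_py)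

-- ===== LEMMAS AND PROOFS =====

-- pvCountHash counts the leading '#' prefix
theorem pvCountHash_eq (text : List Char) :
    pvCountHash text = (text.takeWhile (· == '#')).length := by
  induction text with
  | nil => rfl
  | cons ch rest ih =>
    by_cases hc : ch = '#'
    · simp [pvCountHash, hc, ih]
    · simp [pvCountHash, hc]

-- A's length-subtraction level equals the takeWhile count
theorem pvLevel_eq (text : List Char) :
    (text.length : Int) - ((text.dropWhile (· == '#')).length : Int)
      = ((text.takeWhile (· == '#')).length : Int) := by
  have := congrArg List.length (List.takeWhile_append_dropWhile (p := (· == '#')) (l := text))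
  simp only [List.length_append] at this
  omega

-- A's per-heading result equals B's per-heading result
theorem pvParse_eq (text : List Char) :
    ((if PySem.Chars.strip (PySem.List.slice text
          (some ((text.length : Int) - ((text.dropWhile (· == '#')).length : Int))) none) = []
        then none
        else some (String.ofList (PySem.Chars.strip (PySem.List.slice text
          (some ((text.length : Int) - ((text.dropWhile (· == '#')).length : Int))) none))),
      some ((text.length : Int) - ((text.dropWhile (· == '#')).length : Int)))
      : Option String × Option Int)
    = ((if PySem.Chars.strip (text.drop (pvCountHash text)) = []
        then none
        else some (String.ofList (PySem.Chars.strip (text.drop (pvCountHash text)))),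
      some ((pvCountHash text : Nat) : Int))) := by
  rw [pvLevel_eq, pvCountHash_eq text]
  rw [PySem.List.slice_from_natCast]

-- the backward scan over indices (n-1 … 0) computes the last heading of the prefix lines.take n
theorem pvGoA_take (lines : List String) (n : Nat) (hn : n ≤ lines.length) :
    pvGoA lines (((List.range n).map Int.ofNat).reverse)
      = match (((lines.take n).map (fun line => PySem.Chars.rstrip line.toList)).filter
            (fun t => PySem.Chars.startswith t ['#'])).getLast? with
        | none => (none, none)
        | some text =>
          let level := pvCountHash text
          let title := PySem.Chars.strip (text.drop level)
          (if title = [] then none else some (String.ofList title), some (level : Int)) := by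
  induction n with
  | zero => simp [pvGoA]
  | succ m ih =>
    have hm : m < lines.length := by omega
    have htake : lines.take (m + 1) = lines.take m ++ [lines[m]] := by
      rw [List.take_add_one]
      simp [List.getElem?_eq_getElem hm]
    have hget : PySem.List.pyGetD lines ((m : Nat) : Int) "" = lines[m] := by
      rw [PySem.List.pyGetD_natCast]
      exact List.getD_eq_getElem _ _ hm
    rw [List.range_succ]
    simp only [List.map_append, List.map_cons, List.map_nil, List.reverse_append,
      List.reverse_cons, List.reverse_nil, List.nil_append, List.cons_append,
      List.singleton_append, Int.ofNat_eq_natCast]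
    rw [pvGoA, hget, htake]
    simp only [List.map_append, List.filter_append, List.map_cons, List.map_nil,
      List.filter_cons, List.filter_nil]
    by_cases hs : PySem.Chars.startswith (PySem.Chars.rstrip lines[m].toList) ['#'] = true
    · rw [if_pos hs, if_pos hs, List.getLast?_concat]
      exact pvParse_eq _
    · rw [if_neg hs, if_neg hs]
      rw [List.append_nil]
      exact ih (by omega)

-- ===== VERDICT (by name: the statement is the Claim_ definition above) =====
theorem infer_markdown_heading_py_spec : Claim_equal_infer_markdown_heading_py := by
  intro lines start_line _ hpre
  have hpre' : start_line ≤ (lines.length : Int) := hpre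
  unfold Spec_infer_markdown_heading_py infer_markdown_heading_py infer_markdown_heading_py_alt
  by_cases h0 : start_line ≤ 0
  · rw [if_pos h0, PySem.List.pyRange_neg_one_eq_nil (by omega)]
    rfl
  · rw [if_neg h0]
    have hslice : PySem.List.slice lines none (some start_line) = lines.take start_line.toNat :=
      PySem.List.slice_to _ (by omega)
    rw [PySem.List.pyRange_neg_one_eq_reverse]
    have hr : PySem.List.pyRange (-1 + 1) (start_line - 1 + 1) 1
        = (List.range start_line.toNat).map Int.ofNat := by
      have e1 : (-1 : Int) + 1 = 0 := by norm_num
      have e2 : start_line - 1 + 1 = start_line := by ring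
      rw [e1, e2, PySem.List.pyRange_one]
      simp [Int.ofNat_eq_natCast]
    rw [hr, hslice, pvGoA_take lines start_line.toNat (by omega)]

theorem infer_markdown_heading_py_raises : Claim_raises_infer_markdown_heading_py := by
  unfold Claim_raises_infer_markdown_heading_py
  constructor
  · intro lines start_line _ hr
    unfold Raises_infer_markdown_heading_py at hr
    unfold Pre_infer_markdown_heading_py
    omega
  · refine ⟨by decide, by decide, by decide⟩

-- re-stated consequence of infer_markdown_heading_py_raises: the raise region is disjoint from Pre_
theorem pv_raises_outside_pre_ok : ∀ (lines : List String) (start_line : Int),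
    Dom_infer_markdown_heading_py lines start_line →
    Raises_infer_markdown_heading_py lines start_line →
    ¬ Pre_infer_markdown_heading_py lines start_line :=
  infer_markdown_heading_py_raises.1
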